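-- pv_equiv track=rewrite | github.com/Shardyne/CDMOproject | source/SMT/python_files/bella/utils.py | build_solution_table
-- ===== SOURCE A (Python) =====
-- def build_solution_table(opp, hom, per, N, W, P):
--     """
--     opp[t][w] : int in 1..N (!= t+1)
--     hom[t][w] : bool  (True=home, False=away)
--     per[t][w] : int in 1..P
--     Return: sol[P][W] with each entry [home_team_id, away_team_id] (1-based).
--     """
--     # rows = periods (1..P), cols = weeks (0..W-1)
--     sol = [[None for _ in range(W)] for _ in range(P)]
--
--     # bucket teams by (week, period)
--     by_wp = {(w, p): [] for w in range(W) for p in range(1, P+1)}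
--     for t in range(N):
--         for w in range(W):
--             p = per[t][w]
--             by_wp[(w, p)].append(t)
--
--     # build pairs
--     for w in range(W):
--         for p in range(1, P+1):
--             teams = by_wp[(w, p)]
--             if len(teams) != 2:
--                 raise ValueError(f"Week {w}, Period {p} has {len(teams)} teams (expected 2).")
--             a, b = teams  # team indices 0-based
--             ha, hb = hom[a][w], hom[b][w]
--
--             if ha and not hb:
--                 pair = [a+1, b+1]
--             elif hb and not ha:
--                 pair = [b+1, a+1]
--             else:
--                 # This shouldn't happen if you enforced XOR(Home[a,w], Home[b,w]).
--                 # As a safety fallback, orient using Opp (arbitrary but deterministic).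
--                 if opp[a][w] == b+1 and opp[b][w] == a+1:
--                     pair = [a+1, b+1]
--                 else:
--                     raise ValueError(f"Inconsistent Home/Opp at week {w}, period {p}: teams={teams}, "
--                                      f"homes=({ha},{hb}), opp=({opp[a][w]},{opp[b][w]})")
--             sol[p-1][w] = pair
--
--     # sanity
--     for p in range(P):
--         for w in range(W):
--             h, a = sol[p][w]
--             assert 1 <= h <= N and 1 <= a <= N and h != a
--
--     return sol
-- ===== SOURCE B (Python) =====
-- def build_solution_table(opp, hom, per, N, W, P):
--     """
--     Same contract as the original: sol[P][W] with each entry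
--     [home_team_id, away_team_id] (1-based).  No bucketing dict: each
--     (week, period) slot finds its two teams by a direct scan over the
--     teams, and the table is built by comprehension.
--     """
--     def slot(w, p):
--         teams = [t for t in range(N) if per[t][w] == p]
--         if len(teams) != 2:
--             raise ValueError(f"Week {w}, Period {p} has {len(teams)} teams (expected 2).")
--         a, b = teams
--         ha, hb = hom[a][w], hom[b][w]
--         if ha and not hb:
--             return [a + 1, b + 1]
--         if hb and not ha:
--             return [b + 1, a + 1]
--         if opp[a][w] == b + 1 and opp[b][w] == a + 1:
--             return [a + 1, b + 1]
--         raise ValueError(f"Inconsistent Home/Opp at week {w}, period {p}: teams={teams}, "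
--                          f"homes=({ha},{hb}), opp=({opp[a][w]},{opp[b][w]})")
--     return [[slot(w, p) for w in range(W)] for p in range(1, P + 1)]
-- ===== Notes on version B (the rewrite author's own statement) =====
-- stated objective: simpler
-- what changed: B drops A's (week, period) bucketing dict, its preallocated None-grid mutated in place and its final sanity pass: each slot finds its two teams by a direct increasing scan over range(N) and the table is built by a single nested comprehension.
import Mathlib
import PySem

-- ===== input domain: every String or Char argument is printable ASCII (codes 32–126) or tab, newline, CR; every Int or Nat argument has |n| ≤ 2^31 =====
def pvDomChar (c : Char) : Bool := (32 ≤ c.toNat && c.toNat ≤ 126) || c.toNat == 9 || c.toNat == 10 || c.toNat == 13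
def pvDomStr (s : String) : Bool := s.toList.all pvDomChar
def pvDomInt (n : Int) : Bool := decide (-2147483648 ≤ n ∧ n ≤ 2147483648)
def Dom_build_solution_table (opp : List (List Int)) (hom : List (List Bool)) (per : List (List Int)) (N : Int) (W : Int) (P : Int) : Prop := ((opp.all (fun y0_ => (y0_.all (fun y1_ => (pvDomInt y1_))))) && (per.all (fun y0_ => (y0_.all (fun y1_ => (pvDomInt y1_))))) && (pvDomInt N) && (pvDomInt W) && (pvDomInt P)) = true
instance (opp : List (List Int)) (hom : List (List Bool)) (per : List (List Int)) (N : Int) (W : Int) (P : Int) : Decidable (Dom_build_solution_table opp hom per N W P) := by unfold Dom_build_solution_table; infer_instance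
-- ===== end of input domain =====

-- B replaces A's (week, period) bucketing dict and preallocated, mutated grid by a direct
-- per-slot scan over the teams and a comprehension-built table (objective: simpler).

-- ===== PORT A =====
-- by_wp = {(w, p): [] for w in range(W) for p in range(1, P+1)}
def pvA_init (W P : Int) : PySem.Dict (Int × Int) (List Int) :=
  (PySem.List.pyRange 0 W 1).foldl (fun d w =>
    (PySem.List.pyRange 1 (P+1) 1).foldl (fun d p => d.insert (w, p) []) d) PySem.Dict.empty

-- for t in range(N): for w in range(W): by_wp[(w, per[t][w])].append(t)
-- (per[t][w] ported with pyGetD / Dict.modify; an out-of-range index or a missing key is a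
--  Python IndexError/KeyError, excluded by Pre_)
def pvA_fill (per : List (List Int)) (N W : Int) (d : PySem.Dict (Int × Int) (List Int)) :
    PySem.Dict (Int × Int) (List Int) :=
  (PySem.List.pyRange 0 N 1).foldl (fun d t =>
    (PySem.List.pyRange 0 W 1).foldl (fun d w =>
      d.modify (w, PySem.List.pyGetD (PySem.List.pyGetD per t []) w 0) [] (fun l => l ++ [t])) d) d

-- the pair-building double loop; the two 'raise ValueError' paths (len(teams) != 2,
-- inconsistent Home/Opp) return no value in Python and are excluded by Pre_:
-- the port leaves the slot untouched resp. writes the sentinel [] there.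
def pvA_build (opp : List (List Int)) (hom : List (List Bool)) (W P : Int)
    (d : PySem.Dict (Int × Int) (List Int)) (sol : List (List (List Int))) :
    List (List (List Int)) :=
  (PySem.List.pyRange 0 W 1).foldl (fun s w =>
    (PySem.List.pyRange 1 (P+1) 1).foldl (fun s p =>
      match d.getD (w, p) [] with
      | [a, b] =>
        let ha := PySem.List.pyGetD (PySem.List.pyGetD hom a []) w false
        let hb := PySem.List.pyGetD (PySem.List.pyGetD hom b []) w false
        let pair : List Int :=
          if ha && !hb then [a+1, b+1]
          else if hb && !ha then [b+1, a+1]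
          else if PySem.List.pyGetD (PySem.List.pyGetD opp a []) w 0 == b+1 &&
                  PySem.List.pyGetD (PySem.List.pyGetD opp b []) w 0 == a+1 then [a+1, b+1]
          else []          -- Python: raise ValueError (inconsistent Home/Opp) — outside Pre_
        s.set (p-1).toNat ((s.getD (p-1).toNat []).set w.toNat pair)
      | _ => s             -- Python: raise ValueError (len(teams) != 2) — outside Pre_
    ) s) sol

-- sol = [[None]*W for _ in range(P)]; None is represented by the sentinel [] (inside Pre_
-- every cell is overwritten, so the sentinel is never part of the returned value).
-- The final sanity loop only asserts (no effect on the value; failures cannot occur inside Pre_).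
def build_solution_table (opp : List (List Int)) (hom : List (List Bool)) (per : List (List Int)) (N : Int) (W : Int) (P : Int) : List (List (List Int)) :=
  pvA_build opp hom W P (pvA_fill per N W (pvA_init W P))
    (List.replicate P.toNat (List.replicate W.toNat []))

-- ===== PORT B =====
-- teams = [t for t in range(N) if per[t][w] == p]
def pvB_teams (per : List (List Int)) (N w p : Int) : List Int :=
  (PySem.List.pyRange 0 N 1).filter
    (fun t => PySem.List.pyGetD (PySem.List.pyGetD per t []) w 0 == p)

-- slot(w, p): the two 'raise ValueError' paths are outside Pre_ (the port returns [] there).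
def pvB_slot (opp : List (List Int)) (hom : List (List Bool)) (per : List (List Int))
    (N w p : Int) : List Int :=
  match pvB_teams per N w p with
  | [a, b] =>
    let ha := PySem.List.pyGetD (PySem.List.pyGetD hom a []) w false
    let hb := PySem.List.pyGetD (PySem.List.pyGetD hom b []) w false
    if ha && !hb then [a+1, b+1]
    else if hb && !ha then [b+1, a+1]
    else if PySem.List.pyGetD (PySem.List.pyGetD opp a []) w 0 == b+1 &&
            PySem.List.pyGetD (PySem.List.pyGetD opp b []) w 0 == a+1 then [a+1, b+1]
    else []                -- raise ValueError — outside Pre_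
  | _ => []                -- raise ValueError — outside Pre_

-- return [[slot(w, p) for w in range(W)] for p in range(1, P+1)]
def build_solution_table_alt (opp : List (List Int)) (hom : List (List Bool)) (per : List (List Int)) (N : Int) (W : Int) (P : Int) : List (List (List Int)) :=
  (PySem.List.pyRange 1 (P+1) 1).map (fun p =>
    (PySem.List.pyRange 0 W 1).map (fun w => pvB_slot opp hom per N w p))

-- ===== PRECONDITION & SPEC =====
-- Pre_ = exactly the inputs on which Python A returns normally: either no slot is ever built
-- (W <= 0, or N <= 0 with P <= 0), or every per[t][w] exists and lies in 1..P (else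
-- IndexError/KeyError), every hom[t][w] exists (else IndexError), every (week, period) slot
-- has exactly two teams (which forces N = 2*P), and each slot is orientable — the two homes
-- differ, or opp pairs the two teams mutually (reading opp in range).  Stated with
-- size-bounded quantifiers so that it is cheaply decidable.
def Pre_build_solution_table (opp : List (List Int)) (hom : List (List Bool)) (per : List (List Int)) (N : Int) (W : Int) (P : Int) : Prop :=
  W ≤ 0 ∨ (N ≤ 0 ∧ P ≤ 0) ∨
  (0 < N ∧ N ≤ (per.length : Int) ∧ N ≤ (hom.length : Int) ∧ N = 2 * P ∧
   (∀ row ∈ per.take N.toNat, W ≤ (row.length : Int) ∧ ∀ v ∈ row.take W.toNat, 1 ≤ v ∧ v ≤ P) ∧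
   (∀ row ∈ hom.take N.toNat, W ≤ (row.length : Int)) ∧
   (∀ p ∈ PySem.List.pyRange 1 (P+1) 1, ∀ w ∈ PySem.List.pyRange 0 W 1,
      let teams := (PySem.List.pyRange 0 N 1).filter
        (fun t => PySem.List.pyGetD (PySem.List.pyGetD per t []) w 0 == p)
      teams.length = 2 ∧
      (let a := teams.getD 0 0
       let b := teams.getD 1 0
       PySem.List.pyGetD (PySem.List.pyGetD hom a []) w false ≠
         PySem.List.pyGetD (PySem.List.pyGetD hom b []) w false ∨
       (PySem.List.pyGet? (PySem.List.pyGetD opp a []) w = some (b+1) ∧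
        PySem.List.pyGet? (PySem.List.pyGetD opp b []) w = some (a+1)))))
instance (opp : List (List Int)) (hom : List (List Bool)) (per : List (List Int)) (N : Int) (W : Int) (P : Int) : Decidable (Pre_build_solution_table opp hom per N W P) := by unfold Pre_build_solution_table; infer_instance

def pvWitness_build_solution_table : List (List Int) × List (List Bool) × List (List Int) × Int × Int × Int :=
  ([[2], [1]], [[true], [false]], [[1], [1]], 2, 1, 1)

def Spec_build_solution_table (opp : List (List Int)) (hom : List (List Bool)) (per : List (List Int)) (N : Int) (W : Int) (P : Int) (out : List (List (List Int))) : Prop := out = build_solution_table_alt opp hom per N W P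
instance (opp : List (List Int)) (hom : List (List Bool)) (per : List (List Int)) (N : Int) (W : Int) (P : Int) (out : List (List (List Int))) : Decidable (Spec_build_solution_table opp hom per N W P out) := by unfold Spec_build_solution_table; infer_instance

-- ===== CLAIM (what is proved, stated in full; the proofs are below) =====
def Claim_equal_build_solution_table : Prop := ∀ (opp : List (List Int)) (hom : List (List Bool)) (per : List (List Int)) (N : Int) (W : Int) (P : Int), Dom_build_solution_table opp hom per N W P → Pre_build_solution_table opp hom per N W P → Spec_build_solution_table opp hom per N W P (build_solution_table opp hom per N W P)

-- ===== LEMMAS AND PROOFS =====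

-- the (week, period) slot update A performs, as a row transformer
def pvRowF (opp : List (List Int)) (hom : List (List Bool)) (per : List (List Int))
    (N w p : Int) (row : List (List Int)) : List (List Int) :=
  match pvB_teams per N w p with
  | [a, b] =>
    let ha := PySem.List.pyGetD (PySem.List.pyGetD hom a []) w false
    let hb := PySem.List.pyGetD (PySem.List.pyGetD hom b []) w false
    row.set w.toNat (
      if ha && !hb then [a+1, b+1]
      else if hb && !ha then [b+1, a+1]
      else if PySem.List.pyGetD (PySem.List.pyGetD opp a []) w 0 == b+1 &&
              PySem.List.pyGetD (PySem.List.pyGetD opp b []) w 0 == a+1 then [a+1, b+1]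
      else [])
  | _ => row

-- the same update as a cell transformer
def pvG (opp : List (List Int)) (hom : List (List Bool)) (per : List (List Int))
    (N w p : Int) (x : List Int) : List Int :=
  match pvB_teams per N w p with
  | [a, b] =>
    let ha := PySem.List.pyGetD (PySem.List.pyGetD hom a []) w false
    let hb := PySem.List.pyGetD (PySem.List.pyGetD hom b []) w false
    if ha && !hb then [a+1, b+1]
    else if hb && !ha then [b+1, a+1]
    else if PySem.List.pyGetD (PySem.List.pyGetD opp a []) w 0 == b+1 &&
            PySem.List.pyGetD (PySem.List.pyGetD opp b []) w 0 == a+1 then [a+1, b+1]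
    else []
  | _ => x

-- setting an index to its own current value changes nothing
theorem pv_set_getD_self {α : Type} (s : List α) (k : Nat) (d : α) :
    s.set k (s.getD k d) = s := by
  by_cases h : k < s.length
  · rw [List.getD_eq_getElem s d h, List.set_getElem_self]
  · exact List.set_eq_of_length_le (by omega)

-- every value held by the key-initialisation dict is []
theorem pv_ins_nil_getD {κ : Type} [BEq κ] [LawfulBEq κ] [DecidableEq κ]
    (l : List κ) (d : PySem.Dict κ (List Int)) (k : κ) (h : d.getD k [] = []) :
    (l.foldl (fun d k' => d.insert k' []) d).getD k [] = [] := by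
  induction l generalizing d with
  | nil => exact h
  | cons x xs ih =>
    exact ih _ (by rw [PySem.Dict.getD_insert]; split <;> simp [h])

theorem pv_ins_nil_getD2 (lw lp : List Int) (d : PySem.Dict (Int × Int) (List Int))
    (k : Int × Int) (h : d.getD k [] = []) :
    (lw.foldl (fun d w => lp.foldl (fun d p => d.insert (w, p) []) d) d).getD k [] = [] := by
  induction lw generalizing d with
  | nil => exact h
  | cons w ws ih =>
    refine ih _ ?_
    have h2 := pv_ins_nil_getD (lp.map (fun p => (w, p))) d k h
    rwa [List.foldl_map] at h2

theorem pv_init_getD (W P : Int) (k : Int × Int) : (pvA_init W P).getD k [] = [] := by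
  unfold pvA_init
  exact pv_ins_nil_getD2 _ _ _ _ (by simp [PySem.Dict.getD_empty])

-- filtering a duplicate-free list on 'first component equals w' keeps at most the w entry
theorem pv_filter_key (l : List Int) (hnd : l.Nodup) (w : Int) (hw : w ∈ l)
    {c : Int → Int} {p : Int} :
    l.filter (fun x => (x, c x) == (w, p)) = if c w == p then [w] else [] := by
  induction l with
  | nil => cases hw
  | cons y ys ih =>
    rw [List.filter_cons]
    rcases List.mem_cons.mp hw with rfl | hmem
    · have hys : ys.filter (fun x => (x, c x) == (w, p)) = [] := by
        rw [List.filter_eq_nil_iff]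
        intro x hx
        have hxw : x ≠ w := by
          rintro rfl
          exact (List.nodup_cons.mp hnd).1 hx
        simp [Prod.ext_iff, hxw]
      rw [hys]
      by_cases h : c w = p <;> simp [Prod.ext_iff, h]
    · have hyw : y ≠ w := by
        rintro rfl
        exact (List.nodup_cons.mp hnd).1 hmem
      have : ((y, c y) == (w, p)) = false := by simp [Prod.ext_iff, hyw]
      rw [this, ih (List.nodup_cons.mp hnd).2 hmem]
      simp

-- A's bucket for (w, p) is exactly B's direct scan
theorem pv_fill_one (per : List (List Int)) (t W : Int)
    (d : PySem.Dict (Int × Int) (List Int)) (w p : Int)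
    (hw : w ∈ PySem.List.pyRange 0 W 1) :
    ((PySem.List.pyRange 0 W 1).foldl (fun d w' =>
        d.modify (w', PySem.List.pyGetD (PySem.List.pyGetD per t []) w' 0) [] (fun l => l ++ [t])) d).getD (w, p) []
      = d.getD (w, p) [] ++
        (if PySem.List.pyGetD (PySem.List.pyGetD per t []) w 0 == p then [t] else []) := by
  have h1 : (PySem.List.pyRange 0 W 1).foldl (fun d w' =>
      d.modify (w', PySem.List.pyGetD (PySem.List.pyGetD per t []) w' 0) [] (fun l => l ++ [t])) d
      = ((PySem.List.pyRange 0 W 1).map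
          (fun w' => ((w', PySem.List.pyGetD (PySem.List.pyGetD per t []) w' 0), t))).foldl
          (fun d q => d.modify q.1 [] (fun l => l ++ [q.2])) d := by
    rw [List.foldl_map]
  rw [h1, PySem.Dict.getD_foldl_modify_append]
  congr 1
  rw [List.filter_map, List.map_map]
  have h2 : ((fun q => q.1 == (w, p)) ∘
      (fun w' => ((w', PySem.List.pyGetD (PySem.List.pyGetD per t []) w' 0), t)))
      = fun w' => (w', PySem.List.pyGetD (PySem.List.pyGetD per t []) w' 0) == (w, p) := rfl
  rw [h2, pv_filter_key _ (PySem.List.nodup_pyRange_one 0 W) w hw]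
  split <;> rfl

theorem pv_fill_getD (per : List (List Int)) (lt : List Int) (W : Int)
    (d : PySem.Dict (Int × Int) (List Int)) (w p : Int)
    (hw : w ∈ PySem.List.pyRange 0 W 1) :
    (lt.foldl (fun d t => (PySem.List.pyRange 0 W 1).foldl (fun d w' =>
        d.modify (w', PySem.List.pyGetD (PySem.List.pyGetD per t []) w' 0) [] (fun l => l ++ [t])) d) d).getD (w, p) []
      = d.getD (w, p) [] ++
        lt.filter (fun t => PySem.List.pyGetD (PySem.List.pyGetD per t []) w 0 == p) := by
  induction lt generalizing d with
  | nil => simp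
  | cons t ts ih =>
    rw [List.foldl_cons, ih _, pv_fill_one per t W d w p hw, List.filter_cons]
    split <;> simp

theorem pv_teams_eq (per : List (List Int)) (N W P : Int) (w p : Int) (hw : w ∈ PySem.List.pyRange 0 W 1) :
    (pvA_fill per N W (pvA_init W P)).getD (w, p) [] = pvB_teams per N w p := by
  unfold pvA_fill pvB_teams
  rw [pv_fill_getD per _ W _ w p hw, pv_init_getD, List.nil_append]

-- a fold that sets every index 0..n-1 of a map-built list, from its own current value
theorem pv_foldl_set_rows {α : Type} (n : Nat) (f : Nat → α → α) (h : Nat → α)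
    (rest : List α) (d : α) :
    (List.range n).foldl (fun s k => s.set k (f k (s.getD k d))) ((List.range n).map h ++ rest)
      = (List.range n).map (fun k => f k (h k)) ++ rest := by
  induction n generalizing rest with
  | zero => simp
  | succ m ih =>
    rw [List.range_succ, List.map_append, List.map_append, List.append_assoc,
      List.append_assoc, List.foldl_append, ih]
    simp only [List.map_cons, List.map_nil, List.foldl_cons, List.foldl_nil,
      List.singleton_append]
    have hget : (((List.range m).map (fun k => f k (h k))) ++ h m :: rest).getD m d = h m := by
      rw [List.getD_eq_getElem?_getD, List.getElem?_append_right (by simp)]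
      simp
    rw [hget, List.set_append]
    simp

theorem pv_foldl_set_rows' {α : Type} (n : Nat) (f : Nat → α → α) (h : Nat → α) (d : α) :
    (List.range n).foldl (fun s k => s.set k (f k (s.getD k d))) ((List.range n).map h)
      = (List.range n).map (fun k => f k (h k)) := by
  have h2 := pv_foldl_set_rows n f h [] d
  simpa using h2

-- interchanging the two write loops: the grid fold row by row
theorem pv_foldl_grid {α : Type} (ws : List Nat) (n : Nat) (g : Nat → Nat → α → α)
    (d : α) (h : Nat → α) :
    ws.foldl (fun s j => (List.range n).foldl (fun s k => s.set k (g j k (s.getD k d))) s)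
        ((List.range n).map h)
      = (List.range n).map (fun k => ws.foldl (fun row j => g j k row) (h k)) := by
  induction ws generalizing h with
  | nil => simp
  | cons j js ih =>
    rw [List.foldl_cons, pv_foldl_set_rows' n (fun k row => g j k row) h d,
      ih (fun k => g j k (h k))]
    simp

theorem pv_G_nil (opp : List (List Int)) (hom : List (List Bool)) (per : List (List Int))
    (N w p : Int) : pvG opp hom per N w p [] = pvB_slot opp hom per N w p := by
  unfold pvG pvB_slot
  generalize pvB_teams per N w p = l
  rcases l with _ | ⟨a, _ | ⟨b, _ | ⟨c, t⟩⟩⟩ <;> rfl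

-- A's result in closed form
theorem pv_A_norm (opp : List (List Int)) (hom : List (List Bool)) (per : List (List Int))
    (N W P : Int) :
    build_solution_table opp hom per N W P
      = (List.range P.toNat).map (fun (k : Nat) =>
          (List.range W.toNat).map (fun (j : Nat) => pvB_slot opp hom per N (j : Int) ((k : Int)+1))) := by
  unfold build_solution_table pvA_build
  calc
    _ = List.foldl (fun s w => List.foldl (fun s p =>
            s.set (p-1).toNat (pvRowF opp hom per N w p (s.getD (p-1).toNat [])))
          s (PySem.List.pyRange 1 (P+1) 1))
          (List.replicate P.toNat (List.replicate W.toNat ([] : List Int)))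
          (PySem.List.pyRange 0 W 1) := by
        refine PySem.List.foldl_congr_mem _ _ _ _ ?_
        intro s w hw
        refine PySem.List.foldl_congr_mem _ _ _ _ ?_
        intro s' p _
        rw [pv_teams_eq per N W P w p hw]
        unfold pvRowF
        generalize pvB_teams per N w p = l
        rcases l with _ | ⟨a, _ | ⟨b, _ | ⟨c, t⟩⟩⟩
        · exact (pv_set_getD_self _ _ _).symm
        · exact (pv_set_getD_self _ _ _).symm
        · rfl
        · exact (pv_set_getD_self _ _ _).symm
    _ = List.foldl (fun s j => List.foldl (fun s k =>
            s.set k (pvRowF opp hom per N (j : Int) ((k : Int)+1) (s.getD k [])))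
          s (List.range P.toNat))
          ((List.range P.toNat).map (fun _ => List.replicate W.toNat []))
          (List.range W.toNat) := by
        rw [PySem.List.pyRange_one 0 W, List.foldl_map,
          show ((W : Int) - 0) = W from by ring,
          show List.replicate P.toNat (List.replicate W.toNat ([] : List Int))
              = (List.range P.toNat).map (fun _ => List.replicate W.toNat []) from by
            rw [List.map_const', List.length_range]]
        refine PySem.List.foldl_congr_mem _ _ _ _ ?_
        intro s j _
        rw [PySem.List.pyRange_one 1 (P+1), show ((P : Int) + 1 - 1) = P from by ring,
          List.foldl_map]
        refine PySem.List.foldl_congr_mem _ _ _ _ ?_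
        intro s' k _
        rw [show ((1 : Int) + (k : Int) - 1).toNat = k from by omega,
          show (1 : Int) + (k : Int) = (k : Int) + 1 from by ring,
          show (0 : Int) + (j : Int) = (j : Int) from by ring]
    _ = (List.range P.toNat).map (fun (k : Nat) =>
          (List.range W.toNat).foldl (fun row (j : Nat) => pvRowF opp hom per N (j : Int) ((k : Int)+1) row)
            (List.replicate W.toNat ([] : List Int))) := by
        exact pv_foldl_grid (List.range W.toNat) P.toNat
          (fun j k row => pvRowF opp hom per N (j : Int) ((k : Int)+1) row) []
          (fun _ => List.replicate W.toNat ([] : List Int))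
    _ = _ := by
        refine List.map_congr_left ?_
        intro k _
        rw [PySem.List.foldl_congr_mem _ _
            (fun row j => row.set j (pvG opp hom per N (j : Int) ((k : Int)+1) (row.getD j []))) _ ?_]
        · rw [show List.replicate W.toNat ([] : List Int)
                = (List.range W.toNat).map (fun _ => ([] : List Int)) from by
              rw [List.map_const', List.length_range],
            pv_foldl_set_rows' W.toNat
              (fun j x => pvG opp hom per N (j : Int) ((k : Int)+1) x)
              (fun _ => ([] : List Int)) []]
          refine List.map_congr_left ?_
          intro j _
          exact pv_G_nil opp hom per N (j : Int) ((k : Int)+1)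
        · intro row j _
          beta_reduce
          unfold pvRowF pvG
          generalize pvB_teams per N (j : Int) ((k : Int)+1) = l
          rcases l with _ | ⟨a, _ | ⟨b, _ | ⟨c, t⟩⟩⟩
          · exact (pv_set_getD_self _ _ _).symm
          · exact (pv_set_getD_self _ _ _).symm
          · rw [Int.toNat_natCast]
          · exact (pv_set_getD_self _ _ _).symm

-- B's result in the same closed form
theorem pv_B_norm (opp : List (List Int)) (hom : List (List Bool)) (per : List (List Int))
    (N W P : Int) :
    build_solution_table_alt opp hom per N W P
      = (List.range P.toNat).map (fun (k : Nat) =>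
          (List.range W.toNat).map (fun (j : Nat) => pvB_slot opp hom per N (j : Int) ((k : Int)+1))) := by
  unfold build_solution_table_alt
  rw [PySem.List.pyRange_one 1 (P+1), show ((P : Int) + 1 - 1) = P from by ring,
    PySem.List.pyRange_one 0 W, show ((W : Int) - 0) = W from by ring,
    List.map_map]
  refine List.map_congr_left ?_
  intro k _
  simp only [Function.comp_apply]
  rw [List.map_map]
  refine List.map_congr_left ?_
  intro j _
  simp only [Function.comp_apply]
  rw [show (0 : Int) + (j : Int) = (j : Int) from by ring,
    show (1 : Int) + (k : Int) = (k : Int) + 1 from by ring]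

-- ===== VERDICT (by name: the statement is the Claim_ definition above) =====
theorem build_solution_table_spec : Claim_equal_build_solution_table := by
  intro opp hom per N W P _ _
  unfold Spec_build_solution_table
  rw [pv_A_norm, pv_B_norm]
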